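-- pv_equiv track=rewrite | github.com/manutevari/aegis-ai-rag-system | aegis_pipeline.py | post_filter
-- ===== SOURCE A (Python) =====
-- def post_filter(results):
--     latest = {}
--     for r in results:
--         sec = r["metadata"]["section"]
--         date = r["metadata"].get("effective_date", "")
--         if sec not in latest or date > latest[sec]["metadata"].get("effective_date", ""):
--             latest[sec] = r
--     return list(latest.values())
-- ===== SOURCE B (Python) =====
-- def post_filter(results):
--     secs = []
--     for r in results:
--         s = r["metadata"]["section"]
--         if s not in secs:
--             secs.append(s)
--     return [max((r for r in results if r["metadata"]["section"] == sec),
--                 key=lambda r: r["metadata"].get("effective_date", ""))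
--             for sec in secs]
-- ===== Notes on version B (the rewrite author's own statement) =====
-- stated objective: alternative
-- what changed: B uses no dict: it first collects the distinct sections in first-appearance order, then for each section scans the whole list with max(key=...) (first date-maximal record), instead of A's single-pass keep-the-best dict update; output order and first-of-ties behaviour are identical.
import Mathlib
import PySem

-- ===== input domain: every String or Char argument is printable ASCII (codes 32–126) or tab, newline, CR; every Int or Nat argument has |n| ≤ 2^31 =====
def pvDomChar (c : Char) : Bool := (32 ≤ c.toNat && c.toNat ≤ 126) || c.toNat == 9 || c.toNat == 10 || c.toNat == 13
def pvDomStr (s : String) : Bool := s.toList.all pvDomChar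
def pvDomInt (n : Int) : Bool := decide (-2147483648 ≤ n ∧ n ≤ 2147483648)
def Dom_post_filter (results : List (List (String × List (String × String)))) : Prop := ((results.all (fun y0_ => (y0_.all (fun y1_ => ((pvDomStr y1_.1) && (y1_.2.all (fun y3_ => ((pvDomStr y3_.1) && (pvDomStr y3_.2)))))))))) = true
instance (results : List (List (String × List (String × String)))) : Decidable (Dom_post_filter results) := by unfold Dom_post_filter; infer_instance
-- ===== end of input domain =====

-- B uses no dict: it collects the distinct sections in first-appearance order, then for each
-- section picks the first date-maximal record among all records of that section; same output
-- order and same first-of-ties behaviour as A's keep-the-best dict update.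

-- shared subscript helpers: r["metadata"], ["section"], .get("effective_date", "")
-- (total via getD; under Pre_ both keys exist, so they equal the Python lookups)
def pvMeta (r : List (String × List (String × String))) : List (String × String) :=
  (PySem.Dict.mk r).getD "metadata" []

def pvSec (r : List (String × List (String × String))) : String :=
  (PySem.Dict.mk (pvMeta r)).getD "section" ""

def pvDate (r : List (String × List (String × String))) : String :=
  (PySem.Dict.mk (pvMeta r)).getD "effective_date" ""

-- ===== PORT A =====
-- loop body of A: keep r if its section is new or its date is strictly later
def pvStepA (latest : PySem.Dict String (List (String × List (String × String))))
    (r : List (String × List (String × String))) :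
    PySem.Dict String (List (String × List (String × String))) :=
  if latest.contains (pvSec r) = false ∨ pvDate (latest.getD (pvSec r) []) < pvDate r then
    latest.insert (pvSec r) r
  else latest

def post_filter (results : List (List (String × List (String × String)))) : List (List (String × List (String × String))) :=
  (results.foldl pvStepA PySem.Dict.empty).values

-- ===== PORT B =====
-- first loop of B: secs.append(s) unless s already seen
def pvSecsStep (acc : List String) (r : List (String × List (String × String))) : List String :=
  if pvSec r ∈ acc then acc else acc ++ [pvSec r]

def pvSecs (results : List (List (String × List (String × String)))) : List String :=
  results.foldl pvSecsStep []

-- pick of B's comprehension: first date-maximal record of the section's records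
def pvPick (results : List (List (String × List (String × String)))) (sec : String) :
    List (String × List (String × String)) :=
  PySem.List.maxD (results.filter (fun r => pvSec r == sec)) pvDate []

def post_filter_alt (results : List (List (String × List (String × String)))) : List (List (String × List (String × String))) :=
  (pvSecs results).map (pvPick results)

-- ===== PRECONDITION & SPEC =====
-- Pre_ excludes exactly the inputs where Python raises KeyError: a record without a
-- "metadata" key, or whose metadata lacks "section".
def Pre_post_filter (results : List (List (String × List (String × String)))) : Prop :=
  ∀ r ∈ results, (PySem.Dict.mk r).contains "metadata" = true ∧
    (PySem.Dict.mk ((PySem.Dict.mk r).getD "metadata" [])).contains "section" = true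

instance (results : List (List (String × List (String × String)))) : Decidable (Pre_post_filter results) := by unfold Pre_post_filter; infer_instance

def pvWitness_post_filter : (List (List (String × List (String × String)))) :=
  [[("metadata", [("section", "a"), ("effective_date", "2020-01-01")])],
   [("metadata", [("section", "a"), ("effective_date", "2021-01-01")])],
   [("metadata", [("section", "b")])]]

def Spec_post_filter (results : List (List (String × List (String × String)))) (out : List (List (String × List (String × String)))) : Prop := out = post_filter_alt results
instance (results : List (List (String × List (String × String)))) (out : List (List (String × List (String × String)))) : Decidable (Spec_post_filter results out) := by unfold Spec_post_filter; infer_instance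

-- ===== CLAIM (what is proved, stated in full; the proofs are below) =====
def Claim_equal_post_filter : Prop := ∀ (results : List (List (String × List (String × String)))), Dom_post_filter results → Pre_post_filter results → Spec_post_filter results (post_filter results)

-- ===== LEMMAS AND PROOFS =====

theorem pv_mem_foldl_secs (xs : List (List (String × List (String × String))))
    (acc : List String) (a : String) :
    a ∈ xs.foldl pvSecsStep acc ↔ a ∈ acc ∨ a ∈ xs.map pvSec := by
  induction xs generalizing acc with
  | nil => simp
  | cons r xs ih =>
    simp only [List.foldl_cons, ih, List.map_cons, List.mem_cons]
    unfold pvSecsStep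
    split_ifs with h
    · constructor
      · rintro (h1 | h2)
        · exact Or.inl h1
        · exact Or.inr (Or.inr h2)
      · rintro (h1 | h1 | h2)
        · exact Or.inl h1
        · exact Or.inl (h1 ▸ h)
        · exact Or.inr h2
    · simp only [List.mem_append, List.mem_singleton]
      tauto

theorem pv_mem_pvSecs (xs : List (List (String × List (String × String)))) (a : String) :
    a ∈ pvSecs xs ↔ a ∈ xs.map pvSec := by
  simpa using pv_mem_foldl_secs xs [] a

theorem pv_nodup_foldl_secs (xs : List (List (String × List (String × String))))
    (acc : List String) (h : acc.Nodup) : (xs.foldl pvSecsStep acc).Nodup := by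
  induction xs generalizing acc with
  | nil => exact h
  | cons r xs ih =>
    apply ih
    unfold pvSecsStep
    split_ifs with hmem
    · exact h
    · rw [List.nodup_append]
      exact ⟨h, List.nodup_singleton _, fun a ha b hb => by
        simp only [List.mem_singleton] at hb
        exact fun heq => hmem ((hb ▸ heq : a = pvSec r) ▸ ha)⟩

theorem pv_nodup_pvSecs (xs : List (List (String × List (String × String)))) :
    (pvSecs xs).Nodup := pv_nodup_foldl_secs xs [] List.nodup_nil

theorem pv_secs_append (xs : List (List (String × List (String × String))))
    (r : List (String × List (String × String))) :
    pvSecs (xs ++ [r]) =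
      if pvSec r ∈ pvSecs xs then pvSecs xs else pvSecs xs ++ [pvSec r] := by
  simp [pvSecs, List.foldl_append, pvSecsStep]

theorem pv_max?_append_singleton {α κ : Type} [LT κ] [DecidableLT κ]
    (xs : List α) (key : α → κ) (r : α) :
    PySem.List.max? (xs ++ [r]) key =
      match PySem.List.max? xs key with
      | none => some r
      | some m => if key m < key r then some r else some m := by
  simp only [PySem.List.max?, List.foldl_append]
  rfl

theorem pv_maxD_append_singleton (xs : List (List (String × List (String × String))))
    (r : List (String × List (String × String))) (hxs : xs ≠ []) :
    PySem.List.maxD (xs ++ [r]) pvDate [] =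
      (if pvDate (PySem.List.maxD xs pvDate []) < pvDate r then r
       else PySem.List.maxD xs pvDate []) := by
  obtain ⟨m, hm⟩ : ∃ m, PySem.List.max? xs pvDate = some m := by
    cases hmx : PySem.List.max? xs pvDate with
    | none => exact absurd ((PySem.List.max?_eq_none_iff xs pvDate).mp hmx) hxs
    | some m => exact ⟨m, rfl⟩
  simp [PySem.List.maxD, pv_max?_append_singleton, hm]
  split_ifs <;> simp

-- section-filtered suffix: appending r only touches r's own section
theorem pv_filter_append (xs : List (List (String × List (String × String))))
    (r : List (String × List (String × String))) (sec : String) :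
    (xs ++ [r]).filter (fun q => pvSec q == sec) =
      xs.filter (fun q => pvSec q == sec) ++ (if pvSec r = sec then [r] else []) := by
  simp [List.filter_append]
  split_ifs with h <;> simp [h]

theorem pv_filter_ne_nil (xs : List (List (String × List (String × String))))
    (sec : String) (h : sec ∈ xs.map pvSec) :
    xs.filter (fun q => pvSec q == sec) ≠ [] := by
  obtain ⟨q, hq, hqs⟩ := List.mem_map.mp h
  intro hnil
  have : q ∈ xs.filter (fun q => pvSec q == sec) := by
    simp [List.mem_filter, hq, hqs]
  rw [hnil] at this
  exact absurd this (List.not_mem_nil)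

theorem pv_filter_eq_nil (xs : List (List (String × List (String × String))))
    (sec : String) (h : sec ∉ xs.map pvSec) :
    xs.filter (fun q => pvSec q == sec) = [] := by
  apply List.filter_eq_nil_iff.mpr
  intro q hq
  simp only [beq_iff_eq]
  intro hqs
  exact h (List.mem_map.mpr ⟨q, hq, hqs⟩)

-- the invariant: A's dict items are exactly B's (section, pick) pairs
theorem pv_inv (rs : List (List (String × List (String × String)))) :
    (rs.foldl pvStepA PySem.Dict.empty).items =
      (pvSecs rs).map (fun sec => (sec, pvPick rs sec)) := by
  induction rs using List.reverseRecOn with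
  | nil => simp [pvSecs, PySem.Dict.empty]
  | append_singleton xs r ih =>
    have hfold : (xs ++ [r]).foldl pvStepA PySem.Dict.empty =
        pvStepA (xs.foldl pvStepA PySem.Dict.empty) r := by
      simp [List.foldl_append]
    set dA := xs.foldl pvStepA PySem.Dict.empty with hdA
    have hkeys : dA.keys = pvSecs xs := by
      simp only [PySem.Dict.keys, ih, List.map_map, Function.comp_def, List.map_id']
    have hnd : dA.keys.Nodup := by rw [hkeys]; exact pv_nodup_pvSecs xs
    have hcontains : dA.contains (pvSec r) = decide (pvSec r ∈ pvSecs xs) := by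
      rw [PySem.Dict.contains_eq_decide_mem_keys, hkeys]
    by_cases hmem : pvSec r ∈ pvSecs xs
    · -- r's section was seen before
      have hc : dA.contains (pvSec r) = true := by simp [hcontains, hmem]
      have hmemmap : pvSec r ∈ xs.map pvSec := (pv_mem_pvSecs xs _).mp hmem
      have hne := pv_filter_ne_nil xs (pvSec r) hmemmap
      have hitem : (pvSec r, pvPick xs (pvSec r)) ∈ dA.items := by
        rw [ih]; exact List.mem_map.mpr ⟨_, hmem, rfl⟩
      have hget : dA.getD (pvSec r) [] = pvPick xs (pvSec r) :=
        PySem.Dict.getD_of_mem_items dA hitem hnd []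
      have hpick_r : pvPick (xs ++ [r]) (pvSec r) =
          (if pvDate (pvPick xs (pvSec r)) < pvDate r then r else pvPick xs (pvSec r)) := by
        unfold pvPick
        rw [pv_filter_append, if_pos rfl]
        exact pv_maxD_append_singleton _ r hne
      have hpick_ne : ∀ sec, sec ≠ pvSec r → pvPick (xs ++ [r]) sec = pvPick xs sec := by
        intro sec hsec
        have hne2 : ¬ pvSec r = sec := fun h => hsec h.symm
        unfold pvPick
        rw [pv_filter_append, if_neg hne2]
        simp
      rw [hfold, pv_secs_append, if_pos hmem]
      unfold pvStepA
      by_cases hcond : pvDate (dA.getD (pvSec r) []) < pvDate r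
      · rw [if_pos (Or.inr hcond), PySem.Dict.items_insert_of_contains _ _ hc, ih, List.map_map]
        apply List.map_congr_left
        intro sec _
        by_cases hsec : sec = pvSec r
        · rw [hget] at hcond
          simp [Function.comp, hsec, hpick_r, hcond]
        · simp [Function.comp, hsec, hpick_ne sec hsec]
      · rw [if_neg (by simp [hc, hcond]), ih]
        apply List.map_congr_left
        intro sec _
        by_cases hsec : sec = pvSec r
        · rw [hget] at hcond
          simp [hsec, hpick_r, hcond]
        · simp [hpick_ne sec hsec]
    · -- new section: A appends (sec, r); B appends sec with pick = r
      have hc : dA.contains (pvSec r) = false := by simp [hcontains, hmem]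
      have hnmap : pvSec r ∉ xs.map pvSec := fun h => hmem ((pv_mem_pvSecs xs _).mpr h)
      have hpick_r : pvPick (xs ++ [r]) (pvSec r) = r := by
        unfold pvPick
        rw [pv_filter_append, pv_filter_eq_nil xs _ hnmap]
        simp [PySem.List.maxD, PySem.List.max?]
      have hpick_ne : ∀ sec, sec ≠ pvSec r → pvPick (xs ++ [r]) sec = pvPick xs sec := by
        intro sec hsec
        have hne2 : ¬ pvSec r = sec := fun h => hsec h.symm
        unfold pvPick
        rw [pv_filter_append, if_neg hne2]
        simp
      rw [hfold, pv_secs_append, if_neg hmem]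
      unfold pvStepA
      rw [if_pos (Or.inl hc), PySem.Dict.items_insert_of_not_contains _ _ hc, ih,
          List.map_append]
      congr 1
      · apply List.map_congr_left
        intro sec hsec
        have : sec ≠ pvSec r := fun h => hmem (h ▸ hsec)
        simp [hpick_ne sec this]
      · simp [hpick_r]

-- ===== VERDICT (by name: the statement is the Claim_ definition above) =====
theorem post_filter_spec : Claim_equal_post_filter := by
  intro results _ _
  unfold Spec_post_filter post_filter post_filter_alt
  simp only [PySem.Dict.values, pv_inv, List.map_map]
  rfl
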